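-- pv_equiv track=rewrite | github.com/johnrest/aoc_2019 | 04.py | additional_criteria
-- ===== SOURCE A (Python) =====
-- def additional_criteria(digits):
--     diff = [dr - dl for dr, dl in zip(digits[1:], digits[0:-1])]
--
--     diff_as_str = ""
--     for d in diff:
--         if d == 0:
--             diff_as_str += "0"
--         else:
--             diff_as_str += ","
--     diff_list = diff_as_str.split(",")
--     return any(len(d) == 1 for d in diff_list)
-- ===== SOURCE B (Python) =====
-- def additional_criteria(digits):
--     run = 1
--     for dr, dl in zip(digits[1:], digits[:-1]):
--         if dr - dl == 0:
--             run += 1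
--         else:
--             if run == 2:
--                 return True
--             run = 1
--     return run == 2
-- ===== Notes on version B (the rewrite author's own statement) =====
-- stated objective: simpler
-- what changed: Replaced A's encode-diffs-into-a-string-then-split-on-comma-then-scan-pieces trick by a single run-length scan over the adjacent differences that keeps one integer run counter and returns early.
import Mathlib
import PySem

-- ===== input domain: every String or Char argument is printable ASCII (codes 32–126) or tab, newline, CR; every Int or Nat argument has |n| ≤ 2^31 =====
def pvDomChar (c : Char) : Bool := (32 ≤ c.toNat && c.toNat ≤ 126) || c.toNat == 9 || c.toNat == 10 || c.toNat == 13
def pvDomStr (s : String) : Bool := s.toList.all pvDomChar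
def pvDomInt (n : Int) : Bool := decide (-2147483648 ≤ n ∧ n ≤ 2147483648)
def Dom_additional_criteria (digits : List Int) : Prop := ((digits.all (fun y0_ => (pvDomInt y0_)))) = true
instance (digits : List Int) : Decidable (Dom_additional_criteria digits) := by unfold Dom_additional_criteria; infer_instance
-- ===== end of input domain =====

-- B replaces A's build-a-string-of-diffs / split-on-comma trick by a direct
-- run-length scan with one counter (objective: simpler).


-- ===== PORT A =====
def additional_criteria (digits : List Int) : Bool :=
  let diff := (List.zip (PySem.List.slice digits (some 1) none)
                        (PySem.List.slice digits (some 0) (some (-1)))).map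
                (fun p => p.1 - p.2)
  let diff_as_str := diff.foldl (fun s d => s ++ (if d == 0 then "0" else ",")) ""
  -- s.split(","): sep is the nonempty literal ",", so split? is always `some`
  match PySem.Str.split? diff_as_str "," with
  | none => false
  | some diff_list => diff_list.any (fun d => PySem.Str.len d == 1)

-- ===== PORT B =====
def bLoop (run : Int) : List (Int × Int) → Bool
  | [] => run == 2
  | (dr, dl) :: rest =>
      if dr - dl == 0 then bLoop (run + 1) rest
      else if run == 2 then true else bLoop 1 rest

def additional_criteria_alt (digits : List Int) : Bool :=
  bLoop 1 (List.zip (PySem.List.slice digits (some 1) none)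
                    (PySem.List.slice digits (some 0) (some (-1))))

-- ===== PRECONDITION & SPEC =====
def Spec_additional_criteria (digits : List Int) (out : Bool) : Prop := out = additional_criteria_alt digits
instance (digits : List Int) (out : Bool) : Decidable (Spec_additional_criteria digits out) := by unfold Spec_additional_criteria; infer_instance

-- ===== CLAIM (what is proved, stated in full; the proofs are below) =====
def Claim_equal_additional_criteria : Prop := ∀ (digits : List Int), Dom_additional_criteria digits → Spec_additional_criteria digits (additional_criteria digits)

-- ===== LEMMAS AND PROOFS =====

-- segments of a char list between ','s, with the (reversed) current segment as accumulator
def splitSeg : List Char → List Char → List (List Char)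
  | cur, [] => [cur.reverse]
  | cur, c :: rest => if c = ',' then cur.reverse :: splitSeg [] rest else splitSeg (c :: cur) rest

lemma splitOn_go_comma (l : List Char) : ∀ (fuel : Nat) (cur : List Char) (acc : List (List Char)),
    l.length ≤ fuel →
    PySem.Chars.splitOn.go [','] fuel l cur acc = acc.reverse ++ splitSeg cur l := by
  induction l with
  | nil =>
    intro fuel cur acc _
    cases fuel <;> simp [PySem.Chars.splitOn.go, splitSeg]
  | cons c rest ih =>
    intro fuel cur acc hle
    cases fuel with
    | zero => simp at hle
    | succ fuel =>
      by_cases hc : c = ','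
      · subst hc
        have hpre : List.isPrefixOf [','] (',' :: rest) = true := by
          simp [List.isPrefixOf]
        simp only [PySem.Chars.splitOn.go, hpre, List.length_cons] at *
        rw [if_pos trivial]
        have hdrop : List.drop (([] : List Char).length + 1) (',' :: rest) = rest := by simp
        rw [hdrop, ih fuel [] (cur.reverse :: acc) (by omega)]
        simp [splitSeg]
      · have hpre : List.isPrefixOf [','] (c :: rest) = false := by
          simp [List.isPrefixOf]; exact fun h => (hc h.symm).elim
        simp only [PySem.Chars.splitOn.go, hpre, List.length_cons] at *
        rw [ih fuel (c :: cur) acc (by omega)]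
        simp [splitSeg, hc]

lemma splitOn_comma (l : List Char) :
    PySem.Chars.splitOn l [','] = splitSeg [] l := by
  unfold PySem.Chars.splitOn
  rw [splitOn_go_comma l (l.length + 1) [] [] (by omega)]
  simp

-- the character A appends for a difference d
def chi (d : Int) : Char := if d == 0 then '0' else ','

lemma foldl_str_toList (ds : List Int) : ∀ (s : String),
    (ds.foldl (fun s d => s ++ (if d == 0 then "0" else ",")) s).toList
      = s.toList ++ ds.map chi := by
  induction ds with
  | nil => intro s; simp
  | cons d rest ih =>
    intro s
    simp only [List.foldl_cons, List.map_cons, ih]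
    by_cases h : d = 0 <;> simp [h, chi]

-- run-length invariant: scanning the segments of the encoded diff list equals B's loop
lemma splitSeg_any_eq_bLoop (zl : List (Int × Int)) : ∀ (cur : List Char) (run : Int),
    run = (cur.length : Int) + 1 →
    ((splitSeg cur ((zl.map (fun p => p.1 - p.2)).map chi)).any (fun s => s.length == 1))
      = bLoop run zl := by
  induction zl with
  | nil =>
    intro cur run h
    simp only [List.map_nil, splitSeg, bLoop, List.any_cons, List.any_nil, Bool.or_false,
      List.length_reverse]
    subst h
    by_cases hc : cur.length = 1
    · simp [hc]
    · simp [hc]; omega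
  | cons p rest ih =>
    intro cur run h
    obtain ⟨dr, dl⟩ := p
    by_cases hd : dr - dl = 0
    · have hchi : chi (dr - dl) = '0' := by simp [chi, hd]
      have hb : (dr - dl == 0) = true := by simp [hd]
      simp only [List.map_cons, hchi, splitSeg, bLoop, hb]
      rw [if_neg (by decide : ¬('0' = ',')), if_pos trivial]
      exact ih ('0' :: cur) (run + 1) (by simp; omega)
    · have hchi : chi (dr - dl) = ',' := by simp [chi, hd]
      simp only [List.map_cons, hchi, splitSeg, bLoop]
      rw [if_pos trivial]
      simp only [List.any_cons]
      rw [ih [] 1 (by simp)]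
      have hb : (dr - dl == 0) = false := by simp [hd]
      simp only [hb, Bool.false_eq_true, if_false, List.length_reverse]
      subst h
      by_cases hc : cur.length = 1
      · simp [hc]
      · have h2 : ((cur.length : Int) + 1 == 2) = false := by simp; omega
        simp [hc, h2]

lemma ports_agree (digits : List Int) :
    additional_criteria digits = additional_criteria_alt digits := by
  unfold additional_criteria additional_criteria_alt
  set zl := List.zip (PySem.List.slice digits (some 1) none)
                     (PySem.List.slice digits (some 0) (some (-1))) with hzl
  set ds := zl.map (fun p => p.1 - p.2) with hds
  have htl : (ds.foldl (fun s d => s ++ (if d == 0 then "0" else ",")) "").toList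
      = ds.map chi := by
    rw [foldl_str_toList]; simp
  have hsplit := PySem.Str.split?_map
    (ds.foldl (fun s d => s ++ (if d == 0 then "0" else ",")) "") ","
  cases hs : PySem.Str.split? (ds.foldl (fun s d => s ++ (if d == 0 then "0" else ",")) "") "," with
  | none =>
    rw [hs] at hsplit
    simp [PySem.Chars.split?] at hsplit
  | some l =>
    rw [hs] at hsplit
    simp only [Option.map_some, PySem.Chars.split?, List.isEmpty_iff] at hsplit
    have hsplit' : List.map String.toList l = PySem.Chars.splitOn
        (ds.foldl (fun s d => s ++ (if d == 0 then "0" else ",")) "").toList [','] := by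
      have : ("," : String).toList = [','] := by decide
      rw [← this]; exact Option.some.inj hsplit
    rw [htl, splitOn_comma] at hsplit'
    have hany : (l.any (fun d => PySem.Str.len d == 1))
        = ((splitSeg [] (ds.map chi)).any (fun s => s.length == 1)) := by
      rw [← hsplit', List.any_map]
      congr 1; funext d
      simp [PySem.Str.len_eq, Function.comp]
    show (match PySem.Str.split? (ds.foldl (fun s d => s ++ (if d == 0 then "0" else ",")) "") "," with
      | none => false
      | some diff_list => diff_list.any (fun d => PySem.Str.len d == 1)) = bLoop 1 zl
    rw [hs]
    show (l.any fun d => PySem.Str.len d == 1) = bLoop 1 zl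
    rw [hany, splitSeg_any_eq_bLoop zl [] 1 (by simp)]

-- ===== VERDICT (by name: the statement is the Claim_ definition above) =====
theorem additional_criteria_spec : Claim_equal_additional_criteria := by
  intro digits _
  unfold Spec_additional_criteria
  exact ports_agree digits
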